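-- pv_equiv track=rewrite | github.com/me940728/PBFT_LAB | SCI_PBFT_Lab/origin/node_group.py | get_group_info
-- ===== SOURCE A (Python) =====
-- def get_group_info(nodes, k, index, r):
--     #if문: 첫 그룹에 대한 노드 정보 반환
--     if index == 0 or index < k:
--         return nodes[0: k]
--     else:
--         group = 1  # len(nodes)//k [1. 첫 번째 if문이 아닌 경우에는 group이라는 변수를 1로 설정]
--         '''
--         for 루프를 통해 index가 속한 그룹을 찾기
--         for 루프는 k*2부터 시작하여 k개의 간격으로 진행됨(index가 f보다 작아질 때까지 group을 1씩 증가)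
--         f가 index보다 크거나 같아지면 for 루프를 중단하고, 그 시점의 group이 index가 속한 그룹 번호가 됩니다.
--         '''
--         for f in range(k*2, len(nodes), k):
--             if index < f:
--                 break
--             group += 1
--
--     # index가 속한 그룹의 마지막 노드가 전체 노드 리스트의 마지막 노드를 넘은 경우
--     if (group*k)+k > len(nodes):
--         # group*k부터 전체 노드 리스트의 끝까지를 반환
--         return nodes[(group*k): len(nodes)]
--     # 그 외의 경우 group*k부터 group*k+k까지의 노드 리스트를 반환
--     return nodes[(group*k): (group*k)+k]
-- ===== SOURCE B (Python) =====
-- def get_group_info(nodes, k, index, r):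
--     n = len(nodes)
--     if index == 0 or index < k:
--         return nodes[0:k]
--     group = max(1, min(index // k, (n - 1) // k)) if k > 0 else 1
--     start = group * k
--     end = n if start + k > n else start + k
--     return nodes[start:end]
-- ===== Notes on version B (the rewrite author's own statement) =====
-- stated objective: alternative
-- what changed: Replaced A's counting scan over range(k*2, len(nodes), k) with the closed-form group number max(1, min(index // k, (len(nodes)-1) // k)); the result slice itself still costs O(k), so overall cost is similar (slice-dominated).
import Mathlib
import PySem

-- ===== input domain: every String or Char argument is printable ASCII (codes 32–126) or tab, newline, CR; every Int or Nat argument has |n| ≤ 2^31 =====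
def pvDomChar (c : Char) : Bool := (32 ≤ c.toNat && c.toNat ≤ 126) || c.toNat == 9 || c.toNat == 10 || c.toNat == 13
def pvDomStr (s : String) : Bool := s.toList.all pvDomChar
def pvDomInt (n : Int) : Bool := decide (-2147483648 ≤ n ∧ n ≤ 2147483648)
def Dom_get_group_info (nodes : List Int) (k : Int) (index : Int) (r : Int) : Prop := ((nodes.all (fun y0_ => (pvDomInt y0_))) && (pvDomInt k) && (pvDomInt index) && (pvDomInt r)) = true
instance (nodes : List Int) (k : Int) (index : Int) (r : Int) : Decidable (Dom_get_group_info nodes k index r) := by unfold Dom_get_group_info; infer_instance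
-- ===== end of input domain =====

-- B replaces A's counting scan over range(k*2, len(nodes), k) by the closed-form
-- group number max(1, min(index // k, (len(nodes)-1) // k)).

-- ===== PORT A =====
-- the `for f in range(k*2, len(nodes), k): if index < f: break; group += 1` loop
def ggLoop (index : Int) : List Int → Int → Int
  | [], g => g
  | f :: rest, g => if index < f then g else ggLoop index rest (g + 1)

def get_group_info (nodes : List Int) (k : Int) (index : Int) (r : Int) : List Int :=
  if index == 0 || index < k then
    PySem.List.slice nodes (some 0) (some k)
  else
    let group := ggLoop index (PySem.List.pyRange (k * 2) (nodes.length : Int) k) 1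
    if group * k + k > (nodes.length : Int) then
      PySem.List.slice nodes (some (group * k)) (some (nodes.length : Int))
    else
      PySem.List.slice nodes (some (group * k)) (some (group * k + k))

-- ===== PORT B =====
def get_group_info_alt (nodes : List Int) (k : Int) (index : Int) (r : Int) : List Int :=
  let n : Int := (nodes.length : Int)
  if index == 0 || index < k then
    PySem.List.slice nodes (some 0) (some k)
  else
    let group : Int :=
      if k > 0 then max 1 (min (PySem.Int.floordiv index k) (PySem.Int.floordiv (n - 1) k)) else 1
    let start := group * k
    let stop := if start + k > n then n else start + k
    PySem.List.slice nodes (some start) (some stop)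

-- ===== PRECONDITION & SPEC =====
-- Pre_ excludes exactly the inputs where A raises ValueError (range step 0):
-- k = 0 with index ≠ 0 and index ≥ 0.
def Pre_get_group_info (nodes : List Int) (k : Int) (index : Int) (r : Int) : Prop :=
  k ≠ 0 ∨ index = 0 ∨ index < 0
instance (nodes : List Int) (k : Int) (index : Int) (r : Int) : Decidable (Pre_get_group_info nodes k index r) := by unfold Pre_get_group_info; infer_instance

def pvWitness_get_group_info : List Int × Int × Int × Int := ([10, 20, 30, 40, 50], 2, 3, 0)

def Spec_get_group_info (nodes : List Int) (k : Int) (index : Int) (r : Int) (out : List Int) : Prop := out = get_group_info_alt nodes k index r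
instance (nodes : List Int) (k : Int) (index : Int) (r : Int) (out : List Int) : Decidable (Spec_get_group_info nodes k index r out) := by unfold Spec_get_group_info; infer_instance

-- ===== CLAIM (what is proved, stated in full; the proofs are below) =====
def Claim_equal_get_group_info : Prop := ∀ (nodes : List Int) (k : Int) (index : Int) (r : Int), Dom_get_group_info nodes k index r → Pre_get_group_info nodes k index r → Spec_get_group_info nodes k index r (get_group_info nodes k index r)

-- ===== LEMMAS AND PROOFS =====

-- A's break loop over the arithmetic progression a, a+k, …, a+(m-1)k (k > 0):
-- it adds, clamped at m, one step per progression element ≤ index.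
lemma ggLoop_nil (index g : Int) : ggLoop index [] g = g := rfl

lemma ggLoop_cons (index f g : Int) (rest : List Int) :
    ggLoop index (f :: rest) g = if index < f then g else ggLoop index rest (g + 1) := rfl

lemma ggLoop_range (index k : Int) (hk : 0 < k) :
    ∀ (m : Nat) (a g : Int),
      ggLoop index ((List.range m).map (fun (j : Nat) => a + k * (j : Int))) g =
        g + (if index < a then 0 else min (m : Int) ((index - a) / k + 1)) := by
  intro m
  induction m with
  | zero =>
    intro a g
    rw [List.range_zero, List.map_nil, ggLoop_nil]
    by_cases h : index < a
    · simp [h]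
    · have h0 : 0 ≤ (index - a) / k := Int.ediv_nonneg (by omega) (by omega)
      simp only [if_neg h, Nat.cast_zero]
      omega
  | succ m ih =>
    intro a g
    rw [List.range_succ_eq_map, List.map_cons, List.map_map]
    have hmap : (List.map ((fun (j : Nat) => a + k * (j : Int)) ∘ Nat.succ) (List.range m)) =
        (List.range m).map (fun (j : Nat) => (a + k) + k * (j : Int)) := by
      apply List.map_congr_left
      intro j _
      simp only [Function.comp]
      push_cast
      ring
    rw [hmap, Nat.cast_zero, mul_zero, add_zero, ggLoop_cons]
    by_cases h : index < a
    · simp [h]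
    · rw [if_neg h, if_neg h]
      rw [ih (a + k) (g + 1)]
      by_cases h2 : index < a + k
      · have hz : (index - a) / k = 0 := Int.ediv_eq_zero_of_lt (by omega) (by omega)
        rw [if_pos h2, hz]
        push_cast
        omega
      · have hstep : (index - a) / k = (index - (a + k)) / k + 1 := by
          have : index - a = (index - (a + k)) + 1 * k := by ring
          rw [this, Int.add_mul_ediv_right _ _ (by omega)]
        have h0 : 0 ≤ (index - (a + k)) / k := Int.ediv_nonneg (by omega) (by omega)
        rw [if_neg h2, hstep]
        push_cast
        omega

-- the closed form of A's group number, for k > 0 and index ≥ k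
lemma group_eq (n index k : Int) (hk : 0 < k) (hik : k ≤ index) (hn : 0 ≤ n) :
    ggLoop index (PySem.List.pyRange (k * 2) n k) 1 =
      max 1 (min (PySem.Int.floordiv index k) (PySem.Int.floordiv (n - 1) k)) := by
  rw [PySem.List.pyRange_of_pos _ _ hk, PySem.Int.floordiv_eq_ediv_of_pos hk,
    PySem.Int.floordiv_eq_ediv_of_pos hk, ggLoop_range index k hk]
  have hqi1 : 1 ≤ index / k := (Int.le_ediv_iff_mul_le hk).2 (by omega)
  by_cases hlt : k * 2 < n
  · -- the range is nonempty: its length is (n-1)/k - 1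
    have hm : (n - k * 2 + k - 1) / k = (n - 1) / k - 1 := by
      have h1 : n - 1 = (n - k * 2 + k - 1) + 1 * k := by ring
      rw [h1, Int.add_mul_ediv_right _ _ (by omega)]
      ring
    have hqn2 : 2 ≤ (n - 1) / k := (Int.le_ediv_iff_mul_le hk).2 (by omega)
    rw [if_pos hlt, hm]
    have hcast : (((n - 1) / k - 1).toNat : Int) = (n - 1) / k - 1 := Int.toNat_of_nonneg (by omega)
    rw [hcast]
    by_cases h2 : index < k * 2
    · have hqi : index / k < 2 := (Int.ediv_lt_iff_lt_mul hk).2 (by omega)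
      rw [if_pos h2]
      omega
    · have hqi2 : 2 ≤ index / k := (Int.le_ediv_iff_mul_le hk).2 (by omega)
      have hstep : (index - k * 2) / k = index / k - 2 := by
        have h1 : index = (index - k * 2) + 2 * k := by ring
        conv_rhs => rw [h1, Int.add_mul_ediv_right _ _ (by omega)]
        ring
      rw [if_neg h2, hstep]
      omega
  · -- empty range: group stays 1, and min(index//k, (n-1)//k) ≤ 1
    have hqn : (n - 1) / k < 2 := (Int.ediv_lt_iff_lt_mul hk).2 (by omega)
    rw [if_neg hlt]
    by_cases h2 : index < k * 2
    · have hqi : index / k < 2 := (Int.ediv_lt_iff_lt_mul hk).2 (by omega)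
      rw [if_pos h2]
      omega
    · have hqi2 : 2 ≤ index / k := (Int.le_ediv_iff_mul_le hk).2 (by omega)
      have h0 : 0 ≤ (index - k * 2) / k := Int.ediv_nonneg (by omega) (by omega)
      rw [if_neg h2]
      omega

-- for k < 0 the range is empty (start k*2 < 0 ≤ stop n, negative step)
lemma pyRange_neg_empty (n k : Int) (hk : k < 0) (hn : 0 ≤ n) :
    PySem.List.pyRange (k * 2) n k = [] := by
  simp only [PySem.List.pyRange]
  rw [if_neg (by omega : ¬ k = 0)]
  rw [if_neg (by omega : ¬ 0 < k), if_neg (by omega : ¬ n < k * 2)]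
  simp

theorem get_group_info_spec : Claim_equal_get_group_info := by
  intro nodes k index r _ hpre
  unfold Pre_get_group_info at hpre
  unfold Spec_get_group_info get_group_info get_group_info_alt
  by_cases hfirst : (index == 0 || decide (index < k)) = true
  · rw [if_pos hfirst, if_pos hfirst]
  · rw [if_neg hfirst, if_neg hfirst]
    have h' : ¬(index = 0 ∨ index < k) := by simpa using hfirst
    push_neg at h'
    obtain ⟨hne, hge⟩ := h'
    have hk : k ≠ 0 := by
      rcases hpre with h | h | h
      · exact h
      · exact absurd h hne
      · omega
    have hg : ggLoop index (PySem.List.pyRange (k * 2) ((nodes.length : Int)) k) 1 =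
        (if k > 0 then
          max 1 (min (PySem.Int.floordiv index k) (PySem.Int.floordiv ((nodes.length : Int) - 1) k))
        else 1) := by
      rcases lt_or_gt_of_ne hk with hneg | hpos
      · rw [pyRange_neg_empty _ _ hneg (by positivity), if_neg (by omega : ¬ k > 0), ggLoop_nil]
      · rw [group_eq _ _ _ hpos hge (by positivity), if_pos (by omega : k > 0)]
    simp only [hg]
    split_ifs <;> rfl
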